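-- pv_equiv track=rewrite | github.com/ratheile/dviz16 | server.py | extract_movie_and_year
-- ===== SOURCE A (Python) =====
-- def extractnr(x):
--     return int(''.join(ele for ele in x if ele.isdigit()))
--
-- def extract_movie_and_year(tokens, start):
--     moviename = ""
--     year = None
--     appendnext = True
--     ismovie = True
--     ismovienow = False
--     for t in range(start, len(tokens)-1):
--         ismovienow = ismovie
--         if tokens[t+1].startswith('(1') == False and tokens[t+1].startswith('(2') == False and ismovienow == True:
--             appendnext = True
--         elif tokens[t+1].startswith('(1') == True or tokens[t+1].startswith('(2') == True :
--             ismovie = False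
--             year = extractnr(tokens[t+1])
--
--         if appendnext == True and ismovienow == True:
--             moviename = moviename + str(" " + tokens[t])
--             appendnext == False
--     return [moviename, year]
-- ===== SOURCE B (Python) =====
-- def extract_movie_and_year(tokens, start):
--     year = None
--     boundary = None
--     for i in range(start + 1, len(tokens)):
--         if tokens[i].startswith('(1') or tokens[i].startswith('(2'):
--             if boundary is None:
--                 boundary = i
--             year = int(''.join(c for c in tokens[i] if c.isdigit()))
--     if boundary is None:
--         boundary = len(tokens) - 1
--     moviename = ''.join(' ' + tokens[t] for t in range(start, boundary))
--     return [moviename, year]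
-- ===== Notes on version B (the rewrite author's own statement) =====
-- stated objective: simpler
-- what changed: A's interleaved stateful loop (ismovie/ismovienow/appendnext flags driving conditional string appends) is replaced by a locate-then-build decomposition: one scan records the first year-token index (boundary) and the last year value, then the movie name is joined in one expression over range(start, boundary).
import Mathlib
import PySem

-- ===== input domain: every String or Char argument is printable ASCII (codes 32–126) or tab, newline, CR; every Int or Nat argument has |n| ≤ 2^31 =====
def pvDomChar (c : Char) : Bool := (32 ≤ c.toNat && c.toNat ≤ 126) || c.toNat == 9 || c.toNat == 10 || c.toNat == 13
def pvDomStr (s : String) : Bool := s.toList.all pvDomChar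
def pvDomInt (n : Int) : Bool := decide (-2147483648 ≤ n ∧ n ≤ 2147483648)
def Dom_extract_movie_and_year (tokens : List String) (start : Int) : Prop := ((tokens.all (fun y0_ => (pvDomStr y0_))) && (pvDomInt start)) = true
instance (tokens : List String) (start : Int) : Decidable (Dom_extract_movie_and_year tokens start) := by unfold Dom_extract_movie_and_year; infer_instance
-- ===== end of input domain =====

-- B replaces A's flag-driven append loop by a locate-boundary-then-join decomposition (simpler; same cost).


-- ===== PORT A =====
-- extractnr: int(''.join(ele for ele in x if ele.isdigit())); getD 0 is the ValueError case
-- (empty digit string), unreachable at every call site (callers pass tokens starting '(1'/'(2').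
def extractnr (x : String) : Int :=
  (PySem.Int.ofStr? (String.ofList (x.toList.filter (fun c => PySem.Chars.isdigit c)))).getD 0

-- the loop body of A; state = (moviename, year, appendnext, ismovie)
def pvStepA (tokens : List String) (s : String × Option Int × Bool × Bool) (t : Int) :
    String × Option Int × Bool × Bool :=
  match s with
  | (moviename, year, appendnext, ismovie) =>
    let ismovienow := ismovie
    let nxt := PySem.List.pyGetD tokens (t + 1) ""
    let s1 :=
      if !PySem.Str.startswith nxt "(1" && !PySem.Str.startswith nxt "(2" && ismovienow then
        (moviename, year, true, ismovie)
      else if PySem.Str.startswith nxt "(1" || PySem.Str.startswith nxt "(2" then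
        (moviename, some (extractnr nxt), appendnext, false)
      else (moviename, year, appendnext, ismovie)
    if s1.2.2.1 && ismovienow then
      (s1.1 ++ " " ++ PySem.List.pyGetD tokens t "", s1.2.1, s1.2.2.1, s1.2.2.2)
    else s1

def extract_movie_and_year (tokens : List String) (start : Int) : String × Option Int :=
  let r := (PySem.List.pyRange start ((tokens.length : Int) - 1) 1).foldl
    (pvStepA tokens) ("", none, true, true)
  (r.1, r.2.1)

-- ===== PORT B =====
def pvIsYear (s : String) : Bool :=
  PySem.Str.startswith s "(1" || PySem.Str.startswith s "(2"

-- loop body of B's scan; state = (boundary, year)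
def pvScanStep (tokens : List String) (st : Option Int × Option Int) (i : Int) :
    Option Int × Option Int :=
  let tok := PySem.List.pyGetD tokens i ""
  if pvIsYear tok then
    ((if st.1.isNone then some i else st.1), some (extractnr tok))
  else st

def extract_movie_and_year_alt (tokens : List String) (start : Int) : String × Option Int :=
  let n : Int := tokens.length
  let scan := (PySem.List.pyRange (start + 1) n 1).foldl (pvScanStep tokens) (none, none)
  let boundary := scan.1.getD (n - 1)
  let moviename := (PySem.List.pyRange start boundary 1).foldl
    (fun acc t => acc ++ " " ++ PySem.List.pyGetD tokens t "") ""
  (moviename, scan.2)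

-- ===== PRECONDITION & SPEC =====
-- Exactly the inputs on which Python A returns: for a nonempty loop range A indexes
-- tokens[start] and tokens[start+1], so it raises IndexError iff start < len-1 and start < -len.
def Pre_extract_movie_and_year (tokens : List String) (start : Int) : Prop :=
  start ≥ -(tokens.length : Int) ∨ start ≥ (tokens.length : Int) - 1
instance (tokens : List String) (start : Int) : Decidable (Pre_extract_movie_and_year tokens start) := by
  unfold Pre_extract_movie_and_year; infer_instance

def pvWitness_extract_movie_and_year : List String × Int := (["The", "Movie", "(1999)"], 0)

def Spec_extract_movie_and_year (tokens : List String) (start : Int) (out : String × Option Int) : Prop := out = extract_movie_and_year_alt tokens start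
instance (tokens : List String) (start : Int) (out : String × Option Int) : Decidable (Spec_extract_movie_and_year tokens start out) := by unfold Spec_extract_movie_and_year; infer_instance

-- ===== CLAIM (what is proved, stated in full; the proofs are below) =====
def Claim_equal_extract_movie_and_year : Prop := ∀ (tokens : List String) (start : Int), Dom_extract_movie_and_year tokens start → Pre_extract_movie_and_year tokens start → Spec_extract_movie_and_year tokens start (extract_movie_and_year tokens start)

-- ===== LEMMAS AND PROOFS =====

-- once the scan's boundary is set, it stays set
theorem pvScan_fst_const (tokens : List String) (l : List Int) (st : Option Int × Option Int)
    (h : st.1.isSome) : (l.foldl (pvScanStep tokens) st).1 = st.1 := by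
  induction l generalizing st with
  | nil => rfl
  | cons i l ih =>
    simp only [List.foldl_cons]
    have hstep : (pvScanStep tokens st i).1 = st.1 := by
      unfold pvScanStep
      cases hst : st.1 with
      | none => simp [Option.isSome, hst] at h
      | some v =>
        by_cases hy : pvIsYear (PySem.List.pyGetD tokens i "") = true <;> simp [hy, hst]
    rw [ih _ (by rw [hstep]; exact h), hstep]

-- a boundary found by the scan lies inside the scanned range
theorem pvScan_fst_lb (tokens : List String) (a e : Int) (y : Option Int) (i : Int)
    (h : ((PySem.List.pyRange a e 1).foldl (pvScanStep tokens) (none, y)).1 = some i) :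
    a ≤ i := by
  by_cases hae : a < e
  · rw [PySem.List.pyRange_one_cons hae, List.foldl_cons] at h
    by_cases hy : pvIsYear (PySem.List.pyGetD tokens a "") = true
    · have hstep : pvScanStep tokens (none, y) a
          = (some a, some (extractnr (PySem.List.pyGetD tokens a ""))) := by
        unfold pvScanStep; simp [hy]
      rw [hstep, pvScan_fst_const tokens _ _ (by simp)] at h
      simp at h; omega
    · have hstep : pvScanStep tokens (none, y) a = (none, y) := by
        unfold pvScanStep; simp [hy]
      rw [hstep] at h
      have := pvScan_fst_lb tokens (a + 1) e y i h
      omega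
  · rw [PySem.List.pyRange_one_eq_nil (by omega)] at h
    simp at h
termination_by (e - a).toNat
decreasing_by omega

-- A's loop after ismovie has turned false: moviename frozen, year follows the scan
theorem pvFoldA_dead (tokens : List String) (e : Int) :
    ∀ (a : Int) (m : String) (y : Option Int) (b0 : Int),
    (PySem.List.pyRange a e 1).foldl (pvStepA tokens) (m, y, true, false)
      = (m, ((PySem.List.pyRange (a + 1) (e + 1) 1).foldl (pvScanStep tokens) (some b0, y)).2,
          true, false) := by
  intro a m y b0
  by_cases hae : a < e
  · rw [PySem.List.pyRange_one_cons hae, PySem.List.pyRange_one_cons (by omega : a + 1 < e + 1)]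
    simp only [List.foldl_cons]
    have hA : pvStepA tokens (m, y, true, false) a
        = (m, (if pvIsYear (PySem.List.pyGetD tokens (a + 1) "") then
                 some (extractnr (PySem.List.pyGetD tokens (a + 1) "")) else y), true, false) := by
      unfold pvStepA pvIsYear
      cases h1 : PySem.Str.startswith (PySem.List.pyGetD tokens (a + 1) "") "(1" <;>
        cases h2 : PySem.Str.startswith (PySem.List.pyGetD tokens (a + 1) "") "(2" <;> simp_all
    have hB : pvScanStep tokens (some b0, y) (a + 1)
        = (some b0, (if pvIsYear (PySem.List.pyGetD tokens (a + 1) "") then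
                 some (extractnr (PySem.List.pyGetD tokens (a + 1) "")) else y)) := by
      unfold pvScanStep
      by_cases h : pvIsYear (PySem.List.pyGetD tokens (a + 1) "") = true <;> simp [h]
    rw [hA, hB]
    exact pvFoldA_dead tokens e (a + 1) m _ b0
  · rw [PySem.List.pyRange_one_eq_nil (by omega : e ≤ a),
        PySem.List.pyRange_one_eq_nil (by omega : e + 1 ≤ a + 1)]
    rfl
termination_by a => (e - a).toNat
decreasing_by omega

-- main invariant: A's loop from a with live state equals B's scan-then-join from a
theorem pvFoldA_live (tokens : List String) (e : Int) :
    ∀ (a : Int) (m : String) (y : Option Int),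
    (PySem.List.pyRange a e 1).foldl (pvStepA tokens) (m, y, true, true)
      = (let r := (PySem.List.pyRange (a + 1) (e + 1) 1).foldl (pvScanStep tokens) (none, y)
         ((PySem.List.pyRange a (r.1.getD e) 1).foldl
            (fun acc t => acc ++ " " ++ PySem.List.pyGetD tokens t "") m,
          r.2, true, r.1.isNone)) := by
  intro a m y
  by_cases hae : a < e
  · rw [PySem.List.pyRange_one_cons hae, PySem.List.pyRange_one_cons (by omega : a + 1 < e + 1)]
    simp only [List.foldl_cons]
    by_cases hy : pvIsYear (PySem.List.pyGetD tokens (a + 1) "") = true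
    · -- year token at a+1: A appends tokens[a] once more and goes dead; scan sets boundary a+1
      have hA : pvStepA tokens (m, y, true, true) a
          = (m ++ " " ++ PySem.List.pyGetD tokens a "",
             some (extractnr (PySem.List.pyGetD tokens (a + 1) "")), true, false) := by
        unfold pvStepA; unfold pvIsYear at hy
        cases h1 : PySem.Str.startswith (PySem.List.pyGetD tokens (a + 1) "") "(1" <;>
          cases h2 : PySem.Str.startswith (PySem.List.pyGetD tokens (a + 1) "") "(2" <;>
          simp_all
      have hB : pvScanStep tokens (none, y) (a + 1)
          = (some (a + 1), some (extractnr (PySem.List.pyGetD tokens (a + 1) ""))) := by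
        unfold pvScanStep; simp [hy]
      rw [hA, hB]
      rw [pvFoldA_dead tokens e (a + 1) _ _ (a + 1)]
      have hfst : ((PySem.List.pyRange (a + 1 + 1) (e + 1) 1).foldl (pvScanStep tokens)
          (some (a + 1), some (extractnr (PySem.List.pyGetD tokens (a + 1) "")))).1
          = some (a + 1) :=
        pvScan_fst_const tokens _ _ (by simp)
      simp only [hfst, Option.getD_some, Option.isNone_some]
      rw [PySem.List.pyRange_one_singleton a]
      rfl
    · -- non-year token at a+1: A appends tokens[a] and stays live; scan unchanged
      have hA : pvStepA tokens (m, y, true, true) a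
          = (m ++ " " ++ PySem.List.pyGetD tokens a "", y, true, true) := by
        unfold pvStepA; unfold pvIsYear at hy
        cases h1 : PySem.Str.startswith (PySem.List.pyGetD tokens (a + 1) "") "(1" <;>
          cases h2 : PySem.Str.startswith (PySem.List.pyGetD tokens (a + 1) "") "(2" <;>
          simp_all
      have hB : pvScanStep tokens (none, y) (a + 1) = (none, y) := by
        unfold pvScanStep; simp [hy]
      rw [hA, hB]
      rw [pvFoldA_live tokens e (a + 1) (m ++ " " ++ PySem.List.pyGetD tokens a "") y]
      simp only
      set r := (PySem.List.pyRange (a + 1 + 1) (e + 1) 1).foldl (pvScanStep tokens) (none, y)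
        with hr
      have hlt : a < r.1.getD e := by
        cases hr1 : r.1 with
        | none => simp; omega
        | some i =>
          have := pvScan_fst_lb tokens (a + 1 + 1) (e + 1) y i (by rw [← hr]; exact hr1)
          simp; omega
      rw [PySem.List.pyRange_one_cons hlt, List.foldl_cons]
  · rw [PySem.List.pyRange_one_eq_nil (by omega : e ≤ a),
        PySem.List.pyRange_one_eq_nil (by omega : e + 1 ≤ a + 1)]
    simp only [List.foldl_nil, Option.getD_none, Option.isNone_none]
    rw [PySem.List.pyRange_one_eq_nil (by omega : e ≤ a)]
    rfl
termination_by a => (e - a).toNat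
decreasing_by omega

-- ===== VERDICT (by name: the statement is the Claim_ definition above) =====
theorem extract_movie_and_year_spec : Claim_equal_extract_movie_and_year := by
  intro tokens start _ _
  unfold Spec_extract_movie_and_year extract_movie_and_year extract_movie_and_year_alt
  have h := pvFoldA_live tokens ((tokens.length : Int) - 1) start "" none
  have he : (tokens.length : Int) - 1 + 1 = (tokens.length : Int) := by omega
  rw [he] at h
  rw [h]
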